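-- pv_equiv track=rewrite | github.com/robbiechia/curriculum-workforce-alignment | streamlit_dashboard.py | _precluded_by_curriculum
-- ===== SOURCE A (Python) =====
-- def _precluded_by_curriculum(
--     curriculum_codes: set[str],
--     candidate_code: str,
--     prec_sets: dict[str, dict[str, set[str]]],
-- ) -> bool:
--     """True if candidate is precluded by anything in the curriculum (or vice-versa)."""
--     if candidate_code in curriculum_codes:
--         return True
--     candidate_info = prec_sets.get(candidate_code, {"exact": set(), "prefix": set()})
--     candidate_exact = candidate_info["exact"]
--     candidate_prefix = candidate_info["prefix"]
--     for curr_code in curriculum_codes: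
--         if curr_code in candidate_exact:
--             return True
--         curr_info = prec_sets.get(curr_code, {"exact": set(), "prefix": set()})
--         curr_exact = curr_info["exact"]
--         curr_prefix = curr_info["prefix"]
--
--         if candidate_code in curr_exact:
--             return True
--         if any(candidate_code.startswith(prefix) for prefix in curr_prefix):
--             return True
--         if any(curr_code.startswith(prefix) for prefix in candidate_prefix):
--             return True
--     return False
-- ===== SOURCE B (Python) =====
-- def _precluded_by_curriculum(
--     curriculum_codes: set[str],
--     candidate_code: str,
--     prec_sets: dict[str, dict[str, set[str]]],
-- ) -> bool:
--     """True if candidate is precluded by anything in the curriculum (or vice-versa)."""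
--     if candidate_code in curriculum_codes:
--         return True
--     empty = {"exact": set(), "prefix": set()}
--     candidate_info = prec_sets.get(candidate_code, empty)
--     candidate_exact = candidate_info["exact"]
--     candidate_prefix = candidate_info["prefix"]
--     # Case 1: a curriculum code sits in the candidate's exact-preclusion set.
--     if curriculum_codes & candidate_exact:
--         return True
--     # Aggregate the curriculum's preclusion data once, then test the candidate.
--     exact_union = set()
--     prefix_union = set()
--     for curr_code in curriculum_codes:
--         info = prec_sets.get(curr_code, empty)
--         exact_union |= info["exact"]
--         prefix_union |= info["prefix"]
--     if candidate_code in exact_union: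
--         return True
--     if any(candidate_code.startswith(p) for p in prefix_union):
--         return True
--     # Case 4: some curriculum code starts with one of the candidate's prefixes.
--     return any(c.startswith(p) for c in curriculum_codes for p in candidate_prefix)
-- ===== Notes on version B (the rewrite author's own statement) =====
-- stated objective: alternative
-- what changed: Replaces A's single interleaved short-circuit loop (four tests per curriculum code) with a build-then-test decomposition: a set intersection for the curr-in-candidate-exact case, one aggregation pass building the union of all curriculum exact/prefix sets, then independent membership/startswith tests against those unions.
-- outside the precondition, e.g. on _precluded_by_curriculum({'X'}, 'Y', {'Y': {'exact': {'X'}, 'prefix': set()}, 'X': {}}): A returns True, B returns True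
import Mathlib
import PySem

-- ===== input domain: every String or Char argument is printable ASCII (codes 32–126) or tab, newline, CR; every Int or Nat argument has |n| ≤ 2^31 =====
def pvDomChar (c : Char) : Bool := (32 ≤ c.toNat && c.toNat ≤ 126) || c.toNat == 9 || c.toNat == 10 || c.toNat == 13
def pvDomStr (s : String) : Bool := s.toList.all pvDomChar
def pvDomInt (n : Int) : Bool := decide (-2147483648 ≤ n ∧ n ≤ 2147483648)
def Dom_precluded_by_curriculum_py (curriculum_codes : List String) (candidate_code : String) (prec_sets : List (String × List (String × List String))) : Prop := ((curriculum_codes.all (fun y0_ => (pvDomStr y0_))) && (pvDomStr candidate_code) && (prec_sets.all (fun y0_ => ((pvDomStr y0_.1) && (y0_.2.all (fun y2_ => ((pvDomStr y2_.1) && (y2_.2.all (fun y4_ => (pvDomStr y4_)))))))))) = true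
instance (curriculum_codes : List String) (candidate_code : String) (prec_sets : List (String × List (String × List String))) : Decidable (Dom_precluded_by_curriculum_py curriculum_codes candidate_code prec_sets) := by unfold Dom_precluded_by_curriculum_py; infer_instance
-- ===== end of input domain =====

-- B replaces A's single interleaved short-circuit loop by a build-then-test decomposition
-- (set intersection + one aggregation pass building exact/prefix unions, then independent tests); alternative, not faster.

-- shared dict primitive: prec_sets.get(k, default) — first-match association-list lookup
def pvLookupD (ps : List (String × List (String × List String))) (k : String) : List (String × List String) :=
  match ps with
  | [] => [("exact", []), ("prefix", [])]
  | (k', v) :: rest => if k' == k then v else pvLookupD rest k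

-- shared dict primitive: d["exact"] / d["prefix"]; default [] is never used under Pre_ (key present)
def pvKeyD (d : List (String × List String)) (k : String) : List String :=
  match d with
  | [] => []
  | (k', v) :: rest => if k' == k then v else pvKeyD rest k

-- ===== PORT A =====
-- the for-loop over curriculum_codes with its four early returns
def pvLoopA (candidate_code : String) (prec_sets : List (String × List (String × List String)))
    (candidate_exact candidate_prefix : List String) : List String → Bool
  | [] => false
  | curr_code :: rest =>
    if candidate_exact.contains curr_code then true
    else
      let curr_info := pvLookupD prec_sets curr_code
      let curr_exact := pvKeyD curr_info "exact"
      let curr_prefix := pvKeyD curr_info "prefix"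
      if curr_exact.contains candidate_code then true
      else if curr_prefix.any (fun p => PySem.Str.startswith candidate_code p) then true
      else if candidate_prefix.any (fun p => PySem.Str.startswith curr_code p) then true
      else pvLoopA candidate_code prec_sets candidate_exact candidate_prefix rest

def precluded_by_curriculum_py (curriculum_codes : List String) (candidate_code : String) (prec_sets : List (String × List (String × List String))) : Bool :=
  if curriculum_codes.contains candidate_code then true
  else
    let candidate_info := pvLookupD prec_sets candidate_code
    let candidate_exact := pvKeyD candidate_info "exact"
    let candidate_prefix := pvKeyD candidate_info "prefix"
    pvLoopA candidate_code prec_sets candidate_exact candidate_prefix curriculum_codes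

-- ===== PORT B =====
-- the aggregation pass: exact_union |= info["exact"]; prefix_union |= info["prefix"]
def pvUnions (prec_sets : List (String × List (String × List String))) (curriculum_codes : List String) :
    PySem.Set String × PySem.Set String :=
  curriculum_codes.foldl
    (fun acc curr_code =>
      let info := pvLookupD prec_sets curr_code
      (PySem.Set.union acc.1 (pvKeyD info "exact"), PySem.Set.union acc.2 (pvKeyD info "prefix")))
    (PySem.Set.empty, PySem.Set.empty)

def precluded_by_curriculum_py_alt (curriculum_codes : List String) (candidate_code : String) (prec_sets : List (String × List (String × List String))) : Bool :=
  if curriculum_codes.contains candidate_code then true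
  else
    let candidate_info := pvLookupD prec_sets candidate_code
    let candidate_exact := pvKeyD candidate_info "exact"
    let candidate_prefix := pvKeyD candidate_info "prefix"
    if !(PySem.Set.inter curriculum_codes candidate_exact).isEmpty then true
    else
      let us := pvUnions prec_sets curriculum_codes
      if us.1.contains candidate_code then true
      else if us.2.any (fun p => PySem.Str.startswith candidate_code p) then true
      else curriculum_codes.any (fun c => candidate_prefix.any (fun p => PySem.Str.startswith c p))

-- ===== PRECONDITION & SPEC =====
-- Pre_ excludes inputs where some inner dict that A looks up (the candidate's, or a curriculum
-- code's, when the candidate is not already in the curriculum) lacks the "exact" or "prefix" key: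
-- there A raises KeyError unless an earlier test short-circuits first (which is why a few
-- returning inputs are excluded too; see the cite).
def Pre_precluded_by_curriculum_py (curriculum_codes : List String) (candidate_code : String) (prec_sets : List (String × List (String × List String))) : Prop :=
  curriculum_codes.contains candidate_code = true ∨
    ((candidate_code :: curriculum_codes).all (fun k =>
      (List.lookup k prec_sets).all (fun d =>
        d.any (fun q => q.1 == "exact") && d.any (fun q => q.1 == "prefix")))) = true
instance (curriculum_codes : List String) (candidate_code : String) (prec_sets : List (String × List (String × List String))) : Decidable (Pre_precluded_by_curriculum_py curriculum_codes candidate_code prec_sets) := by unfold Pre_precluded_by_curriculum_py; infer_instance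

def pvWitness_precluded_by_curriculum_py : List String × String × (List (String × List (String × List String))) :=
  (["A"], "B", [("A", [("exact", ["B"]), ("prefix", [])])])

def Spec_precluded_by_curriculum_py (curriculum_codes : List String) (candidate_code : String) (prec_sets : List (String × List (String × List String))) (out : Bool) : Prop := out = precluded_by_curriculum_py_alt curriculum_codes candidate_code prec_sets
instance (curriculum_codes : List String) (candidate_code : String) (prec_sets : List (String × List (String × List String))) (out : Bool) : Decidable (Spec_precluded_by_curriculum_py curriculum_codes candidate_code prec_sets out) := by unfold Spec_precluded_by_curriculum_py; infer_instance

-- ===== CLAIM (what is proved, stated in full; the proofs are below) =====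
def Claim_equal_precluded_by_curriculum_py : Prop := ∀ (curriculum_codes : List String) (candidate_code : String) (prec_sets : List (String × List (String × List String))), Dom_precluded_by_curriculum_py curriculum_codes candidate_code prec_sets → Pre_precluded_by_curriculum_py curriculum_codes candidate_code prec_sets → Spec_precluded_by_curriculum_py curriculum_codes candidate_code prec_sets (precluded_by_curriculum_py curriculum_codes candidate_code prec_sets)

-- ===== LEMMAS AND PROOFS =====

-- A's loop is the any-fold of its four per-code tests
theorem pvLoopA_eq_any (cand : String) (ps : List (String × List (String × List String)))
    (ce cp : List String) (l : List String) :
    pvLoopA cand ps ce cp l =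
      l.any (fun c =>
        ce.contains c
        || (pvKeyD (pvLookupD ps c) "exact").contains cand
        || (pvKeyD (pvLookupD ps c) "prefix").any (fun p => PySem.Str.startswith cand p)
        || cp.any (fun p => PySem.Str.startswith c p)) := by
  induction l with
  | nil => rfl
  | cons c rest ih =>
    simp only [pvLoopA, List.any_cons]
    split_ifs <;> simp_all

-- the pair fold projects to two independent folds
theorem pvUnions_proj (ps : List (String × List (String × List String))) :
    ∀ (l : List String) (acc : PySem.Set String × PySem.Set String),
      l.foldl
        (fun acc curr_code =>
          let info := pvLookupD ps curr_code
          (PySem.Set.union acc.1 (pvKeyD info "exact"), PySem.Set.union acc.2 (pvKeyD info "prefix")))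
        acc
      = (l.foldl (fun a c => PySem.Set.union a (pvKeyD (pvLookupD ps c) "exact")) acc.1,
         l.foldl (fun a c => PySem.Set.union a (pvKeyD (pvLookupD ps c) "prefix")) acc.2) := by
  intro l
  induction l with
  | nil => intro acc; rfl
  | cons c rest ih => intro acc; simp only [List.foldl_cons]; exact ih _

-- membership in a foldl of unions
theorem mem_foldl_union (f : String → List String) :
    ∀ (l : List String) (acc : PySem.Set String) (x : String),
      x ∈ l.foldl (fun a c => PySem.Set.union a (f c)) acc ↔ x ∈ acc ∨ ∃ c ∈ l, x ∈ f c := by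
  intro l
  induction l with
  | nil => simp
  | cons c rest ih =>
    intro acc x
    simp only [List.foldl_cons, ih, PySem.Set.mem_union, List.mem_cons]
    constructor
    · rintro (⟨h | h⟩ | ⟨d, hd, hx⟩)
      · exact Or.inl h
      · exact Or.inr ⟨c, Or.inl rfl, h⟩
      · exact Or.inr ⟨d, Or.inr hd, hx⟩
    · rintro (h | ⟨d, rfl | hd, hx⟩)
      · exact Or.inl (Or.inl h)
      · exact Or.inl (Or.inr hx)
      · exact Or.inr ⟨d, hd, hx⟩

-- ===== VERDICT (by name: the statement is the Claim_ definition above) =====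
theorem precluded_by_curriculum_py_spec : Claim_equal_precluded_by_curriculum_py := by
  intro cur cand ps _hDom _hPre
  unfold Spec_precluded_by_curriculum_py precluded_by_curriculum_py precluded_by_curriculum_py_alt
  rw [Bool.eq_iff_iff]
  simp only [pvLoopA_eq_any, pvUnions, pvUnions_proj]
  simp [List.any_eq_true, mem_foldl_union, PySem.Set.mem_inter, List.eq_nil_iff_forall_not_mem]
  constructor
  · rintro (h | ⟨c, hc, ((h1 | h2) | ⟨p, hp, hs⟩) | ⟨p, hp, hs⟩⟩)
    · exact Or.inl h
    · exact Or.inr (Or.inl ⟨c, hc, h1⟩)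
    · exact Or.inr (Or.inr (Or.inl ⟨c, hc, h2⟩))
    · exact Or.inr (Or.inr (Or.inr (Or.inl ⟨p, ⟨c, hc, hp⟩, hs⟩)))
    · exact Or.inr (Or.inr (Or.inr (Or.inr ⟨c, hc, p, hp, hs⟩)))
  · rintro (h | ⟨c, hc, h1⟩ | ⟨c, hc, h2⟩ | ⟨p, ⟨c, hc, hp⟩, hs⟩ | ⟨c, hc, p, hp, hs⟩)
    · exact Or.inl h
    · exact Or.inr ⟨c, hc, Or.inl (Or.inl (Or.inl h1))⟩
    · exact Or.inr ⟨c, hc, Or.inl (Or.inl (Or.inr h2))⟩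
    · exact Or.inr ⟨c, hc, Or.inl (Or.inr ⟨p, hp, hs⟩)⟩
    · exact Or.inr ⟨c, hc, Or.inr ⟨p, hp, hs⟩⟩
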